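-- pv_equiv track=rewrite | github.com/akgoldberg/smooth_lottery | merit_baselines/misc/stackelberg_model.py | generate_kendall_tau_permutations
-- ===== SOURCE A (Python) =====
-- def generate_kendall_tau_permutations(n, D, distance_dict=None):
--     if distance_dict is not None:
--         perms = [perm for dist, perm in distance_dict if dist <= D]
--         return perms
--
--     # Start with the base permutation [0] and 0 inversions
--     permutations = [([0], 0)]
--
--     for i in range(1, n):
--         new_perms = []
--         for perm, current_count in permutations:
--             # Insert new element i in all possible positions
--             for pos in range(len(perm) + 1):
--                 # Calculate new inversion count using the formula:
--                 # added = (element value) - insertion position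
--                 added_inversions = i - pos
--                 new_count = current_count + added_inversions
--
--                 if new_count <= D:
--                     new_perm = perm[:pos] + [i] + perm[pos:]
--                     new_perms.append((new_perm, new_count))
--
--         permutations = new_perms
--
--     # Return only the permutations (without inversion counts)
--     perms = [perm for perm, count in permutations]
--     # dedupe the permutations
--     perms = list(set(map(tuple, perms)))
--     return perms
-- ===== SOURCE B (Python) =====
-- def generate_kendall_tau_permutations(n, D, distance_dict=None):
--     if distance_dict is not None:
--         perms = [perm for dist, perm in distance_dict if dist <= D]
--         return perms
--
--     result = set()
--
--     def build(i, perm, remaining):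
--         # All of 0..n-1 placed: record the permutation.
--         if i >= n:
--             result.add(tuple(perm))
--             return
--         # Insert element i at every position whose inversion cost fits the budget.
--         for pos in range(len(perm) + 1):
--             cost = i - pos
--             if cost <= remaining:
--                 build(i + 1, perm[:pos] + [i] + perm[pos:], remaining - cost)
--
--     build(1, [0], D)
--     return list(result)
-- ===== Notes on version B (the rewrite author's own statement) =====
-- stated objective: alternative
-- what changed: Replaced A's level-by-level breadth-first frontier of (perm, inversion-count) pairs followed by a final set-dedupe pass with a recursive depth-first backtracking builder that threads a decreasing inversion budget and adds each completed permutation to the result set directly, never materialising intermediate frontiers or counts.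
import Mathlib
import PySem

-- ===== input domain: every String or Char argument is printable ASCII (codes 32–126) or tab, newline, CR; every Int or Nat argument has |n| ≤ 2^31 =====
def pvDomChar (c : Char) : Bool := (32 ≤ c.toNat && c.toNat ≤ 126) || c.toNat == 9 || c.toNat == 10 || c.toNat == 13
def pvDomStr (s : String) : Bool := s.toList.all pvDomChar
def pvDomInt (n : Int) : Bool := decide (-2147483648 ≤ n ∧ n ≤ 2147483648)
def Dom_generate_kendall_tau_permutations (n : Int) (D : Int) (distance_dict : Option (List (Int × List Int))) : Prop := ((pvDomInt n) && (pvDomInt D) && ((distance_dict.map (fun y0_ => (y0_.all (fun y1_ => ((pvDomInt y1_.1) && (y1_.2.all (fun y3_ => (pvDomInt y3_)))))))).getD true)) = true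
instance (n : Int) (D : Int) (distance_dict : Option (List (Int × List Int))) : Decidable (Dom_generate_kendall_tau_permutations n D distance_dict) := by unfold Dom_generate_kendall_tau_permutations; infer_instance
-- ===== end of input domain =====

-- B replaces A's breadth-first frontier of (perm, count) pairs (plus final set-dedupe) by a
-- depth-first backtracking builder threading a decreasing inversion budget (objective: alternative).
-- Both Pythons return their result set's elements; the set's hash iteration order is not modelled,
-- the ports return the distinct elements (outputs are compared as finite sets).

-- ===== PORT A =====
-- perm[:pos] + [i] + perm[pos:], used verbatim by both Pythons
def ktIns (perm : List Int) (i pos : Int) : List Int :=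
  PySem.List.slice perm none (some pos) ++ [i] ++ PySem.List.slice perm (some pos) none

-- body of A's 'for i in range(1, n)' loop: one breadth-first expansion of the frontier
def ktStepA (D : Int) (permutations : List (List Int × Int)) (i : Int) : List (List Int × Int) :=
  permutations.foldl
    (fun new_perms pc =>
      (PySem.List.pyRange 0 ((pc.1.length : Int) + 1) 1).foldl
        (fun new_perms pos =>
          if pc.2 + (i - pos) ≤ D then
            new_perms ++ [(ktIns pc.1 i pos, pc.2 + (i - pos))]
          else new_perms)
        new_perms)
    []

def generate_kendall_tau_permutations (n : Int) (D : Int) (distance_dict : Option (List (Int × List Int))) : List (List Int) :=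
  match distance_dict with
  | some dd => dd.foldl (fun perms x => if x.1 ≤ D then perms ++ [x.2] else perms) []
  | none =>
      let permutations := (PySem.List.pyRange 1 n 1).foldl (ktStepA D) [([0], 0)]
      PySem.Set.ofList (permutations.map (fun pc => pc.1))

-- ===== PORT B =====
-- Source B's recursive build(i, perm, remaining); the Nat fuel is (n - i).toNat, so fuel = 0 is 'i >= n'
def ktBuild (n : Int) : Nat → Int → List Int → Int → PySem.Set (List Int) → PySem.Set (List Int)
  | 0, _, perm, _, result => PySem.Set.add result perm
  | fuel + 1, i, perm, remaining, result =>
      (PySem.List.pyRange 0 ((perm.length : Int) + 1) 1).foldl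
        (fun result pos =>
          if i - pos ≤ remaining then
            ktBuild n fuel (i + 1) (ktIns perm i pos) (remaining - (i - pos)) result
          else result)
        result

def generate_kendall_tau_permutations_alt (n : Int) (D : Int) (distance_dict : Option (List (Int × List Int))) : List (List Int) :=
  match distance_dict with
  | some dd => dd.foldl (fun perms x => if x.1 ≤ D then perms ++ [x.2] else perms) []
  | none => ktBuild n (n - 1).toNat 1 [0] D PySem.Set.empty

-- ===== PRECONDITION & SPEC =====
def Spec_generate_kendall_tau_permutations (n : Int) (D : Int) (distance_dict : Option (List (Int × List Int))) (out : List (List Int)) : Prop := out = generate_kendall_tau_permutations_alt n D distance_dict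
instance (n : Int) (D : Int) (distance_dict : Option (List (Int × List Int))) (out : List (List Int)) : Decidable (Spec_generate_kendall_tau_permutations n D distance_dict out) := by unfold Spec_generate_kendall_tau_permutations; infer_instance

-- ===== CLAIM (what is proved, stated in full; the proofs are below) =====
def Claim_equal_generate_kendall_tau_permutations : Prop := ∀ (n : Int) (D : Int) (distance_dict : Option (List (Int × List Int))), Dom_generate_kendall_tau_permutations n D distance_dict → Spec_generate_kendall_tau_permutations n D distance_dict (generate_kendall_tau_permutations n D distance_dict)

-- ===== LEMMAS AND PROOFS =====

-- proof-only list-level view of B's depth-first emission order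
def ktDfs : Nat → Int → List Int → Int → List (List Int)
  | 0, _, perm, _ => [perm]
  | fuel + 1, i, perm, rem =>
      (PySem.List.pyRange 0 ((perm.length : Int) + 1) 1).flatMap
        (fun pos => if i - pos ≤ rem then ktDfs fuel (i + 1) (ktIns perm i pos) (rem - (i - pos)) else [])

theorem kt_ite_append {α : Type} (c : Prop) [Decidable c] (a y : List α) :
    (if c then a ++ y else a) = a ++ (if c then y else []) := by
  split <;> simp

theorem ktBuild_succ_aux (n : Int) (fuel : Nat)
    (IH : ∀ i perm rem res, ktBuild n fuel i perm rem res = (ktDfs fuel i perm rem).foldl PySem.Set.add res)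
    (i rem : Int) (perm : List Int) :
    ∀ (L : List Int) (res : PySem.Set (List Int)),
      L.foldl (fun r pos => if i - pos ≤ rem then ktBuild n fuel (i + 1) (ktIns perm i pos) (rem - (i - pos)) r else r) res
      = (L.flatMap (fun pos => if i - pos ≤ rem then ktDfs fuel (i + 1) (ktIns perm i pos) (rem - (i - pos)) else [])).foldl PySem.Set.add res := by
  intro L
  induction L with
  | nil => intro res; rfl
  | cons pos L ih =>
      intro res
      by_cases hc : i - pos ≤ rem
      · simp only [List.foldl_cons, List.flatMap_cons, if_pos hc, List.foldl_append]
        rw [IH, ih]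
      · simp only [List.foldl_cons, List.flatMap_cons, if_neg hc, List.nil_append]
        exact ih res

theorem ktBuild_eq_foldl (n : Int) :
    ∀ (fuel : Nat) (i : Int) (perm : List Int) (rem : Int) (res : PySem.Set (List Int)),
      ktBuild n fuel i perm rem res = (ktDfs fuel i perm rem).foldl PySem.Set.add res := by
  intro fuel
  induction fuel with
  | zero => intro i perm rem res; rfl
  | succ fuel ih =>
      intro i perm rem res
      rw [ktBuild, ktDfs]
      exact ktBuild_succ_aux n fuel ih i rem perm _ res

-- A's frontier step, read as a flatMap
theorem ktStepA_eq (D i : Int) (f : List (List Int × Int)) :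
    ktStepA D f i
      = f.flatMap (fun pc =>
          (PySem.List.pyRange 0 ((pc.1.length : Int) + 1) 1).flatMap
            (fun pos => if pc.2 + (i - pos) ≤ D then [(ktIns pc.1 i pos, pc.2 + (i - pos))] else [])) := by
  unfold ktStepA
  simp only [kt_ite_append, PySem.List.foldl_append_eq_flatMap]
  rw [← PySem.List.foldl_append_eq_flatMap]
  simp [List.flatMap_def]

-- main correspondence: A's remaining breadth-first levels, projected to perms,
-- are the depth-first emissions of each frontier node with budget D - count
theorem ktMain (n D : Int) :
    ∀ (fuel : Nat) (i : Int), (n - i).toNat = fuel →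
      ∀ (f : List (List Int × Int)),
        ((PySem.List.pyRange i n 1).foldl (ktStepA D) f).map (fun pc => pc.1)
          = f.flatMap (fun pc => ktDfs fuel i pc.1 (D - pc.2)) := by
  intro fuel
  induction fuel with
  | zero =>
      intro i h f
      rw [PySem.List.pyRange_one_eq_nil (by omega)]
      simp only [ktDfs]
      induction f with
      | nil => rfl
      | cons pc f ihf => simp_all
  | succ fuel ih =>
      intro i h f
      rw [PySem.List.pyRange_one_cons (show i < n by omega), List.foldl_cons,
          ih (i + 1) (by omega), ktStepA_eq, List.flatMap_assoc]
      refine List.flatMap_congr (fun pc _ => ?_)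
      rw [ktDfs, List.flatMap_assoc]
      refine List.flatMap_congr (fun pos _ => ?_)
      have e1 : D - (pc.2 + (i - pos)) = D - pc.2 - (i - pos) := by ring
      by_cases hc : pc.2 + (i - pos) ≤ D
      · rw [if_pos hc, if_pos (show i - pos ≤ D - pc.2 by omega)]
        simp [e1]
      · rw [if_neg hc, if_neg (show ¬ i - pos ≤ D - pc.2 by omega)]
        simp

-- ===== VERDICT (by name: the statement is the Claim_ definition above) =====
theorem generate_kendall_tau_permutations_spec : Claim_equal_generate_kendall_tau_permutations := by
  intro n D distance_dict _
  unfold Spec_generate_kendall_tau_permutations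
  cases distance_dict with
  | some dd => rfl
  | none =>
      show PySem.Set.ofList _ = _
      rw [generate_kendall_tau_permutations_alt, ktBuild_eq_foldl]
      have h := ktMain n D (n - 1).toNat 1 rfl [([0], 0)]
      simp only [List.flatMap_cons, List.flatMap_nil, List.append_nil, sub_zero] at h
      rw [PySem.Set.ofList_eq_foldl, h]
      rfl
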